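-- pv_equiv track=rewrite | github.com/IMperiumX/leetcode-solutions | problems/1769-minimum-number-of-operations-to-move-all-balls-to-each-box/solution_bruteforce.py | minOperations_bruteforce
-- ===== SOURCE A (Python) =====
-- def minOperations_bruteforce(boxes: str) -> list[int]:
--     """
--     Calculates the minimum operations to move all balls to each box (brute force).
--
--     Args:
--       boxes: A binary string representing the boxes (1: ball, 0: empty).
--
--     Returns:
--       A list of integers, where each element represents the minimum operations for that box.
--     """
--     n = len(boxes)
--     answer = []
--     for i in range(n):
--         operations = 0
--         for j in range(n):
--             if boxes[j] == "1":
--                 operations += abs(i - j)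
--         answer.append(operations)
--     return answer
-- ===== SOURCE B (Python) =====
-- def minOperations_bruteforce(boxes: str) -> list[int]:
--     """Two-pass prefix accumulation: left costs and right costs, O(n)."""
--     def one_pass(s):
--         res = []
--         cnt = 0
--         ops = 0
--         for ch in s:
--             res.append(ops)
--             cnt += (ch == "1")
--             ops += cnt
--         return res
--     left = one_pass(boxes)
--     right = one_pass(boxes[::-1])[::-1]
--     return [l + r for l, r in zip(left, right)]
-- ===== Notes on version B (the rewrite author's own statement) =====
-- stated objective: faster
-- what changed: Replaced the quadratic nested scan with two linear prefix-accumulation passes (running ball count and cost from the left and from the right) that are summed per box.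
import Mathlib
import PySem

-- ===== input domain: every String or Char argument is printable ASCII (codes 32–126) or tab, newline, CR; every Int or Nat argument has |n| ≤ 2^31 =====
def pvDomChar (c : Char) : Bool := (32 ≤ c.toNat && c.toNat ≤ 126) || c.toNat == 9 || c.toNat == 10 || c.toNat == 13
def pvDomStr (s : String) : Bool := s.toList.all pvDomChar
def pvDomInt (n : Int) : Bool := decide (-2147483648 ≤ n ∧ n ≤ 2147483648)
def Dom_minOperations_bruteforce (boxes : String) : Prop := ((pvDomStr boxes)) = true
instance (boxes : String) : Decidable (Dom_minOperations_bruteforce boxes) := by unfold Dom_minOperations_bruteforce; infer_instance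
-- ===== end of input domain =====

-- B replaces A's quadratic nested scan with two linear prefix-accumulation passes; objective: faster (asymptotic).

-- ===== PORT A =====
-- literal transliteration of the nested loops; boxes[j] with 0 ≤ j < len(boxes) is exact as getD
def minOperations_bruteforce (boxes : String) : List Int :=
  let cs := boxes.toList
  let n := cs.length
  (List.range n).foldl
    (fun (answer : List Int) (i : ℕ) =>
      let operations : Int :=
        (List.range n).foldl
          (fun (operations : Int) (j : ℕ) =>
            if cs.getD j ' ' = '1' then operations + |(i : Int) - (j : Int)| else operations)
          0
      answer ++ [operations])
    []

-- ===== PORT B =====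
-- one_pass: for ch in s: res.append(ops); cnt += (ch == '1'); ops += cnt
def pvStep (st : List Int × Int × Int) (ch : Char) : List Int × Int × Int :=
  let res := st.1 ++ [st.2.2]
  let cnt := st.2.1 + (if ch = '1' then (1 : Int) else 0)
  (res, cnt, st.2.2 + cnt)

def pvOnePass (s : List Char) : List Int :=
  (s.foldl pvStep ([], 0, 0)).1

def minOperations_bruteforce_alt (boxes : String) : List Int :=
  let left := pvOnePass boxes.toList
  let right := (pvOnePass boxes.toList.reverse).reverse
  List.zipWith (· + ·) left right

-- ===== PRECONDITION & SPEC =====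
def Spec_minOperations_bruteforce (boxes : String) (out : List Int) : Prop := out = minOperations_bruteforce_alt boxes
instance (boxes : String) (out : List Int) : Decidable (Spec_minOperations_bruteforce boxes out) := by unfold Spec_minOperations_bruteforce; infer_instance

-- ===== CLAIM (what is proved, stated in full; the proofs are below) =====
def Claim_equal_minOperations_bruteforce : Prop := ∀ (boxes : String), Dom_minOperations_bruteforce boxes → Spec_minOperations_bruteforce boxes (minOperations_bruteforce boxes)

-- ===== LEMMAS AND PROOFS =====

-- indicator: 1 if box j holds a ball
def pvInd (cs : List Char) (j : ℕ) : Int := if cs.getD j ' ' = '1' then 1 else 0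

-- total left-cost of the first i boxes moved to box i
def pvW (cs : List Char) (i : ℕ) : Int := ∑ j ∈ Finset.range i, (((i : Int) - (j : Int)) * pvInd cs j)

-- number of balls
def pvCnt (cs : List Char) : Int := ∑ j ∈ Finset.range cs.length, pvInd cs j

-- brute-force cost of box i
def pvS (cs : List Char) (i : ℕ) : Int := ∑ j ∈ Finset.range cs.length, (|(i : Int) - (j : Int)| * pvInd cs j)

theorem pvList_range_map_sum (f : ℕ → Int) (n : ℕ) :
    ((List.range n).map f).sum = ∑ j ∈ Finset.range n, f j := by
  induction n with
  | zero => simp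
  | succ m ih => simp [List.range_succ, Finset.sum_range_succ, ih]

theorem pvInnerA (cs : List Char) (i : ℕ) :
    (List.range cs.length).foldl
      (fun operations j =>
        if cs.getD j ' ' = '1' then operations + |(i : Int) - (j : Int)| else operations) 0
      = pvS cs i := by
  have hstep :
      (fun (operations : Int) (j : ℕ) =>
        if cs.getD j ' ' = '1' then operations + |(i : Int) - (j : Int)| else operations)
      = (fun (operations : Int) (j : ℕ) =>
          operations + |(i : Int) - (j : Int)| * pvInd cs j) := by
    funext a j
    simp only [pvInd]
    split_ifs <;> simp
  rw [hstep, PySem.List.foldl_add, pvList_range_map_sum]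
  simp [pvS]

theorem pvA_eq_map (boxes : String) :
    minOperations_bruteforce boxes
      = (List.range boxes.toList.length).map (fun (i : ℕ) => pvS boxes.toList i) := by
  unfold minOperations_bruteforce
  rw [PySem.List.foldl_append_singleton_eq_map]
  simp only [List.nil_append]
  exact List.map_congr_left (fun i _ => pvInnerA boxes.toList i)

theorem pvW_zero (cs : List Char) : pvW cs 0 = 0 := by simp [pvW]

theorem pvW_succ_cons (ch : Char) (rest : List Char) (i : ℕ) :
    pvW (ch :: rest) (i + 1)
      = ((i : Int) + 1) * (if ch = '1' then (1 : Int) else 0) + pvW rest i := by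
  unfold pvW
  rw [Finset.sum_range_succ']
  have h0 : pvInd (ch :: rest) 0 = (if ch = '1' then (1 : Int) else 0) := by
    simp [pvInd]
  have hs : ∀ j, pvInd (ch :: rest) (j + 1) = pvInd rest j := by
    intro j; simp [pvInd]
  have hcongr : ∀ j ∈ Finset.range i,
      (((i + 1 : ℕ) : Int) - ((j + 1 : ℕ) : Int)) * pvInd (ch :: rest) (j + 1)
        = ((i : Int) - (j : Int)) * pvInd rest j := by
    intro j _
    rw [hs]
    push_cast
    ring
  rw [Finset.sum_congr rfl hcongr, h0]
  push_cast
  ring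

theorem pvFold_char (cs : List Char) :
    ∀ (res : List Int) (c o : Int),
      cs.foldl pvStep (res, c, o)
        = (res ++ (List.range cs.length).map (fun (i : ℕ) => o + (i : Int) * c + pvW cs i),
           c + pvCnt cs,
           o + (cs.length : Int) * c + pvW cs cs.length) := by
  induction cs with
  | nil => intro res c o; simp [pvCnt, pvW_zero]
  | cons ch rest ih =>
    intro res c o
    have hb : pvCnt (ch :: rest)
        = (if ch = '1' then (1 : Int) else 0) + pvCnt rest := by
      unfold pvCnt
      simp only [List.length_cons]
      rw [Finset.sum_range_succ']
      have : ∀ j, pvInd (ch :: rest) (j + 1) = pvInd rest j := by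
        intro j; simp [pvInd]
      simp only [this]
      have h0 : pvInd (ch :: rest) 0 = (if ch = '1' then (1 : Int) else 0) := by
        simp [pvInd]
      rw [h0]; ring
    have hpt : ∀ i : ℕ,
        (o + (c + (if ch = '1' then (1 : Int) else 0)))
            + (i : Int) * (c + (if ch = '1' then (1 : Int) else 0)) + pvW rest i
          = o + ((i + 1 : ℕ) : Int) * c + pvW (ch :: rest) (i + 1) := by
      intro i
      rw [pvW_succ_cons]
      push_cast
      ring
    have hlist :
        (List.range (rest.length + 1)).map
            (fun (i : ℕ) => o + (i : Int) * c + pvW (ch :: rest) i)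
          = o :: (List.range rest.length).map
              (fun (i : ℕ) =>
                o + (c + (if ch = '1' then (1 : Int) else 0))
                  + (i : Int) * (c + (if ch = '1' then (1 : Int) else 0)) + pvW rest i) := by
      rw [List.range_succ_eq_map, List.map_cons, List.map_map]
      refine congrArg₂ List.cons ?_ ?_
      · simp [pvW_zero]
      · refine List.map_congr_left (fun i _ => ?_)
        simpa using (hpt i).symm
    show rest.foldl pvStep (pvStep (res, c, o) ch) = _
    simp only [pvStep]
    rw [ih]
    refine Prod.ext ?_ (Prod.ext ?_ ?_)
    · simp only [List.length_cons, hlist, List.append_assoc, List.singleton_append]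
    · simp only [hb]; ring
    · simp only [List.length_cons]
      exact hpt rest.length

theorem pvOnePass_eq_map (cs : List Char) :
    pvOnePass cs = (List.range cs.length).map (fun (i : ℕ) => pvW cs i) := by
  unfold pvOnePass
  rw [pvFold_char]
  simp

theorem pvInd_reverse (cs : List Char) (j : ℕ) (hj : j < cs.length) :
    pvInd cs.reverse j = pvInd cs (cs.length - 1 - j) := by
  unfold pvInd
  rw [List.getD_eq_getElem _ _ (by simpa using hj),
      List.getD_eq_getElem _ _ (by omega)]
  rw [List.getElem_reverse]

theorem pvKey (cs : List Char) (i : ℕ) (hi : i < cs.length) :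
    pvS cs i = pvW cs i + pvW cs.reverse (cs.length - 1 - i) := by
  set n := cs.length with hn
  set m := n - 1 - i with hm
  -- right-hand second summand as a sum over the suffix
  have hrev : pvW cs.reverse m
      = ∑ j ∈ Finset.range m, (((j : Int) + 1) * pvInd cs (i + 1 + j)) := by
    unfold pvW
    rw [← Finset.sum_range_reflect (fun j => ((j : Int) + 1) * pvInd cs (i + 1 + j)) m]
    refine Finset.sum_congr rfl (fun j hj => ?_)
    have hjm : j < m := Finset.mem_range.mp hj
    rw [pvInd_reverse cs j (by omega)]
    have h1 : ((m : Int) - (j : Int)) = ((m - 1 - j : ℕ) : Int) + 1 := by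
      push_cast [Nat.sub_sub]; omega
    have h2 : cs.length - 1 - j = i + 1 + (m - 1 - j) := by omega
    rw [h1, h2]
  -- split the brute-force sum at i
  have hsplit : n = (i + 1) + m := by omega
  unfold pvS
  rw [← hn, hsplit, Finset.range_eq_Ico,
      ← Finset.sum_Ico_consecutive (fun j => |(i : Int) - (j : Int)| * pvInd cs j)
        (Nat.zero_le (i + 1)) (by omega : i + 1 ≤ i + 1 + m)]
  rw [← Finset.range_eq_Ico, Finset.sum_range_succ, Finset.sum_Ico_eq_sum_range]
  have hmid : |(i : Int) - (i : Int)| * pvInd cs i = 0 := by simp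
  have hleft : ∑ j ∈ Finset.range i, (|(i : Int) - (j : Int)| * pvInd cs j) = pvW cs i := by
    refine Finset.sum_congr rfl (fun j hj => ?_)
    have hji : j < i := Finset.mem_range.mp hj
    have : |(i : Int) - (j : Int)| = (i : Int) - (j : Int) := by
      apply abs_of_nonneg; omega
    rw [this]
  have hright : ∑ j ∈ Finset.range (i + 1 + m - (i + 1)),
      (|(i : Int) - ((i + 1 + j : ℕ) : Int)| * pvInd cs (i + 1 + j))
      = ∑ j ∈ Finset.range m, (((j : Int) + 1) * pvInd cs (i + 1 + j)) := by
    have hmm : i + 1 + m - (i + 1) = m := by omega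
    rw [hmm]
    refine Finset.sum_congr rfl (fun j _ => ?_)
    have : |(i : Int) - ((i + 1 + j : ℕ) : Int)| = (j : Int) + 1 := by
      push_cast
      rw [abs_sub_comm, abs_of_nonneg (by omega)]
      ring
    rw [this]
  rw [hmid, hleft, hright, ← hrev, pvW]
  ring

-- ===== VERDICT (by name: the statement is the Claim_ definition above) =====
theorem minOperations_bruteforce_spec : Claim_equal_minOperations_bruteforce := by
  intro boxes _
  unfold Spec_minOperations_bruteforce
  set cs := boxes.toList with hcs
  set n := cs.length with hn
  have hA := pvA_eq_map boxes
  have hB : minOperations_bruteforce_alt boxes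
      = List.zipWith (· + ·) ((List.range n).map (fun (i : ℕ) => pvW cs i))
          (((List.range cs.reverse.length).map (fun (i : ℕ) => pvW cs.reverse i)).reverse) := by
    unfold minOperations_bruteforce_alt
    rw [pvOnePass_eq_map, pvOnePass_eq_map]
  rw [hA, hB]
  apply List.ext_getElem
  · simp [hn, hcs]
  · intro i h1 h2
    have hi : i < n := by simpa [hn, hcs] using h1
    simp only [List.getElem_zipWith, List.getElem_map, List.getElem_range,
      List.getElem_reverse, List.length_map, List.length_range, List.length_reverse]
    exact pvKey cs i hi
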